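-- pv_equiv track=rewrite | github.com/Guoxiaolu227/campus_delivery_backend | app/delivery/order_service.py | allocate_couriers
-- ===== SOURCE A (Python) =====
-- def allocate_couriers(optimal_route, all_locations, location_ids,
--                       num_couriers, canteen_node, canteen_id):
--     """
--     根据 GA 最优路线轮转分配骑手（和原来完全相同）
--     """
--     order_location_indices = []
--     for idx in optimal_route:
--         if all_locations[idx] != canteen_node:
--             order_location_indices.append(idx)
--
--     courier_assignments = {}
--     for cid in range(1, num_couriers + 1):
--         courier_assignments[cid] = []
--
--     for step, loc_idx in enumerate(order_location_indices):
--         cid = (step % num_couriers) + 1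
--         courier_assignments[cid].append(loc_idx)
--
--     return courier_assignments
-- ===== SOURCE B (Python) =====
-- def allocate_couriers(optimal_route, all_locations, location_ids,
--                       num_couriers, canteen_node, canteen_id):
--     filtered = [idx for idx in optimal_route
--                 if all_locations[idx] != canteen_node]
--     return {cid: filtered[cid - 1::num_couriers]
--             for cid in range(1, num_couriers + 1)}
-- ===== Notes on version B (the rewrite author's own statement) =====
-- stated objective: idiomatic
-- what changed: B replaces A's incremental location-by-location round-robin loop (modulo step counter appending into per-courier lists) with a filtered list comprehension plus a per-courier stride slice filtered[cid-1::num_couriers], computing each courier's group in closed form.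
import Mathlib
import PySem

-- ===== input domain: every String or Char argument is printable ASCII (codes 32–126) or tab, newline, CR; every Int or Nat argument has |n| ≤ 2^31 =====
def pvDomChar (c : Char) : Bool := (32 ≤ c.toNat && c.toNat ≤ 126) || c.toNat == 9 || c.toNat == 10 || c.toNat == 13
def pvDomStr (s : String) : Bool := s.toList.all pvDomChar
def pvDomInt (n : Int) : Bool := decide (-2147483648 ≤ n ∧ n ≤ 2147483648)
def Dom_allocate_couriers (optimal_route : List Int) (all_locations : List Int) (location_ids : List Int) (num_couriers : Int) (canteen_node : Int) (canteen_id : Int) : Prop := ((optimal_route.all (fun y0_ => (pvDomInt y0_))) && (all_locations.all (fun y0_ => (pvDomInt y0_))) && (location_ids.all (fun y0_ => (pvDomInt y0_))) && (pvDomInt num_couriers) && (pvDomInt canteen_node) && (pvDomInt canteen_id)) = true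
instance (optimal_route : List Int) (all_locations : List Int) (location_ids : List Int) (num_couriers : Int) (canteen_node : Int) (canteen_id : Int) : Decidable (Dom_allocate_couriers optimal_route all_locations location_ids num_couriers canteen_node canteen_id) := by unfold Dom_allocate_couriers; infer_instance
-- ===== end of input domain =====

-- B replaces A's incremental round-robin modulo loop with per-courier stride slices
-- filtered[cid-1::num_couriers] over a filtered comprehension (idiomatic; same cost).


-- ===== PORT A =====
-- literal port of A: filter loop appending indices, dict initialised over range(1, n+1),
-- then a round-robin loop over enumerate(filtered) appending via cid = step % n + 1.
-- all_locations[idx] is pyGetD under Pre_'s in-range condition (IndexError excluded by Pre_).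
def allocate_couriers (optimal_route : List Int) (all_locations : List Int) (location_ids : List Int) (num_couriers : Int) (canteen_node : Int) (canteen_id : Int) : List (Int × List Int) :=
  let order_location_indices : List Int :=
    optimal_route.foldl (fun acc idx =>
      if PySem.List.pyGetD all_locations idx canteen_node != canteen_node then acc ++ [idx]
      else acc) []
  let d0 : PySem.Dict Int (List Int) :=
    (PySem.List.pyRange 1 (num_couriers + 1) 1).foldl (fun d cid => d.insert cid []) PySem.Dict.empty
  let d1 : PySem.Dict Int (List Int) :=
    (PySem.List.enumerate order_location_indices 0).foldl
      (fun d p => d.modify (PySem.Int.mod p.1 num_couriers + 1) [] (fun l => l ++ [p.2])) d0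
  d1.items

-- ===== PORT B =====
-- literal port of B: filtered comprehension, then dict comprehension of stride slices.
def allocate_couriers_alt (optimal_route : List Int) (all_locations : List Int) (location_ids : List Int) (num_couriers : Int) (canteen_node : Int) (canteen_id : Int) : List (Int × List Int) :=
  let filtered : List Int :=
    optimal_route.filter (fun idx => PySem.List.pyGetD all_locations idx canteen_node != canteen_node)
  ((PySem.List.pyRange 1 (num_couriers + 1) 1).foldl
    (fun d cid =>
      d.insert cid ((PySem.List.slice? filtered (some (cid - 1)) none num_couriers).getD []))
    PySem.Dict.empty).items

-- ===== PRECONDITION & SPEC =====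
-- Pre_ excludes exactly the inputs where A raises: an out-of-range index in optimal_route
-- (IndexError), and num_couriers ≤ 0 while some routed location is not the canteen
-- (ZeroDivisionError for 0, KeyError for negative num_couriers).
def Pre_allocate_couriers (optimal_route : List Int) (all_locations : List Int) (location_ids : List Int) (num_couriers : Int) (canteen_node : Int) (canteen_id : Int) : Prop :=
  (∀ i ∈ optimal_route, PySem.Raise.InRange all_locations.length i) ∧
  (1 ≤ num_couriers ∨ ∀ i ∈ optimal_route, PySem.List.pyGet? all_locations i = some canteen_node)
instance (optimal_route : List Int) (all_locations : List Int) (location_ids : List Int) (num_couriers : Int) (canteen_node : Int) (canteen_id : Int) : Decidable (Pre_allocate_couriers optimal_route all_locations location_ids num_couriers canteen_node canteen_id) := by unfold Pre_allocate_couriers; infer_instance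

def pvWitness_allocate_couriers : List Int × List Int × List Int × Int × Int × Int :=
  ([0, 1, 2], [5, 7, 9], [], 2, 5, 0)

def Spec_allocate_couriers (optimal_route : List Int) (all_locations : List Int) (location_ids : List Int) (num_couriers : Int) (canteen_node : Int) (canteen_id : Int) (out : List (Int × List Int)) : Prop := out = allocate_couriers_alt optimal_route all_locations location_ids num_couriers canteen_node canteen_id
instance (optimal_route : List Int) (all_locations : List Int) (location_ids : List Int) (num_couriers : Int) (canteen_node : Int) (canteen_id : Int) (out : List (Int × List Int)) : Decidable (Spec_allocate_couriers optimal_route all_locations location_ids num_couriers canteen_node canteen_id out) := by unfold Spec_allocate_couriers; infer_instance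

-- ===== CLAIM (what is proved, stated in full; the proofs are below) =====
def Claim_equal_allocate_couriers : Prop := ∀ (optimal_route : List Int) (all_locations : List Int) (location_ids : List Int) (num_couriers : Int) (canteen_node : Int) (canteen_id : Int), Dom_allocate_couriers optimal_route all_locations location_ids num_couriers canteen_node canteen_id → Pre_allocate_couriers optimal_route all_locations location_ids num_couriers canteen_node canteen_id → Spec_allocate_couriers optimal_route all_locations location_ids num_couriers canteen_node canteen_id (allocate_couriers optimal_route all_locations location_ids num_couriers canteen_node canteen_id)

-- ===== LEMMAS AND PROOFS =====

-- every n-th element of the list, starting at position t (common form of both sides)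
def pvPick (n : Nat) : Nat → List Int → List Int
  | _, [] => []
  | 0, x :: xs => x :: pvPick n (n - 1) xs
  | t + 1, _ :: xs => pvPick n t xs

theorem pvPick_of_len_le (n : Nat) : ∀ (t : Nat) (xs : List Int), xs.length ≤ t → pvPick n t xs = [] := by
  intro t xs
  induction xs generalizing t with
  | nil => intro _; cases t <;> rfl
  | cons x xs ih =>
    intro h
    cases t with
    | zero => simp at h
    | succ t => exact ih t (by simpa using h)

theorem pv_emod_pred (n a : Int) (hn : 0 < n) :
    (a - 1) % n = if a % n = 0 then n - 1 else a % n - 1 := by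
  have h0 : 0 ≤ a % n := Int.emod_nonneg a (by omega)
  have h1 : a % n < n := Int.emod_lt_of_pos a hn
  have key : (a - 1) % n = (a % n - 1) % n := by
    rw [Int.sub_emod a 1 n, Int.sub_emod (a % n) 1 n, Int.emod_emod_of_dvd a (dvd_refl n)]
  split_ifs with h
  · rw [key, h]
    have h2 : ((0:Int) - 1 + n * 1) % n = (0 - 1) % n := Int.add_mul_emod_self_left (0 - 1) n 1
    rw [← h2, show ((0:Int) - 1 + n * 1) = n - 1 by ring, Int.emod_eq_of_lt (by omega) (by omega)]
  · rw [key, Int.emod_eq_of_lt (by omega) (by omega)]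

theorem pv_mod_zero_iff (n b s : Int) (_hn : 0 < n) (hb : 0 ≤ b) (hbn : b < n) :
    (b - s) % n = 0 ↔ s % n = b := by
  have hbb : b % n = b := Int.emod_eq_of_lt hb hbn
  constructor
  · intro h
    have : s % n = (b - (b - s)) % n := by ring_nf
    rw [this, Int.sub_emod, h, sub_zero, Int.emod_emod_of_dvd b (dvd_refl n), hbb]
  · intro h
    rw [Int.sub_emod, h, hbb, sub_self, Int.zero_emod]

theorem pv_enum_filter_eq_pick (n r : Int) (hn : 0 < n) (hr1 : 1 ≤ r) (hrn : r ≤ n) :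
    ∀ (xs : List Int) (s : Int), 0 ≤ s →
      ((PySem.List.enumerate xs s).filter
          (fun p => PySem.Int.mod p.1 n + 1 == r)).map (·.2)
        = pvPick n.toNat ((r - 1 - s) % n).toNat xs := by
  intro xs
  induction xs with
  | nil => intro s _; simp [PySem.List.enumerate_nil, pvPick]
  | cons x xs ih =>
    intro s hs
    rw [PySem.List.enumerate_cons]
    have hmod : PySem.Int.mod s n = s % n := PySem.Int.mod_eq_emod_of_pos hn
    have he0 : 0 ≤ (r - 1 - s) % n := Int.emod_nonneg _ (by omega)
    have he1 : (r - 1 - s) % n < n := Int.emod_lt_of_pos _ hn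
    have hiff := pv_mod_zero_iff n (r - 1) s hn (by omega) (by omega)
    have hpred : (r - 1 - s - 1) % n =
        if (r - 1 - s) % n = 0 then n - 1 else (r - 1 - s) % n - 1 :=
      pv_emod_pred n (r - 1 - s) hn
    by_cases hit : s % n + 1 = r
    · have hz : (r - 1 - s) % n = 0 := hiff.mpr (by omega)
      have hnext : (r - 1 - (s + 1)) % n = n - 1 := by
        rw [show r - 1 - (s + 1) = r - 1 - s - 1 by ring, hpred, if_pos hz]
      rw [List.filter_cons]
      simp only [hmod, hit, BEq.rfl, if_pos]
      rw [List.map_cons, ih (s + 1) (by omega), hz, hnext]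
      simp [pvPick]
    · have hz : (r - 1 - s) % n ≠ 0 := fun h => hit (by have := hiff.mp h; omega)
      have hnext : (r - 1 - (s + 1)) % n = (r - 1 - s) % n - 1 := by
        rw [show r - 1 - (s + 1) = r - 1 - s - 1 by ring, hpred, if_neg hz]
      have hb : ((s % n) + 1 == r) = false := by
        simp
        omega
      simp only [List.filter_cons, hmod, hb, Bool.false_eq_true, if_false]
      rw [ih (s + 1) (by omega), hnext]
      obtain ⟨m, hm⟩ : ∃ m, ((r - 1 - s) % n).toNat = m + 1 := ⟨((r-1-s)%n).toNat - 1, by omega⟩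
      rw [hm, pvPick]
      congr 1
      omega

theorem pv_filterMap_range_eq_pick (n : Nat) (hn : 0 < n) :
    ∀ (xs : List Int) (t c : Nat), xs.length ≤ t + n * c →
      (List.range c).filterMap (fun k => xs[t + n * k]?) = pvPick n t xs := by
  intro xs
  induction xs with
  | nil => intro t c _; simp [pvPick]
  | cons x xs ih =>
    intro t c hc
    cases t with
    | zero =>
      obtain ⟨c', rfl⟩ : ∃ c', c = c' + 1 := by
        rcases c with _ | c
        · simp at hc
        · exact ⟨c, rfl⟩
      have hlen : xs.length ≤ (n - 1) + n * c' := by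
        have h := hc
        rw [Nat.mul_succ] at h
        simp at h
        omega
      rw [List.range_succ_eq_map, List.filterMap_cons]
      rw [show (x :: xs)[0 + n * 0]? = some x by simp]
      rw [List.filterMap_map]
      rw [List.filterMap_congr (g := fun k => xs[(n - 1) + n * k]?) ?_]
      · rw [ih (n - 1) c' hlen]; rfl
      · intro k _
        simp only [Function.comp_apply]
        rw [show 0 + n * (k + 1) = ((n - 1) + n * k) + 1 by rw [Nat.mul_succ]; omega]
        rw [List.getElem?_cons_succ]
    | succ t' =>
      rw [List.filterMap_congr (g := fun k => xs[t' + n * k]?) ?_]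
      · rw [ih t' c (by simp at hc; omega)]; rfl
      · intro k _
        rw [show t' + 1 + n * k = (t' + n * k) + 1 by omega, List.getElem?_cons_succ]

theorem pv_slice_eq_pick (xs : List Int) (a n : Int) (ha : 0 ≤ a) (hn : 0 < n) :
    PySem.List.slice? xs (some a) none n = some (pvPick n.toNat a.toNat xs) := by
  rw [PySem.List.slice?, if_neg (by omega : ¬ n = 0), PySem.List.sliceIndices]
  simp only [if_neg (by omega : ¬ n < 0), if_neg (by omega : ¬ a < 0), if_pos hn]
  rcases (by omega : (xs.length : Int) ≤ a ∨ a < xs.length) with hle | hlt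
  · rw [min_eq_right hle, if_neg (by omega)]
    rw [pvPick_of_len_le n.toNat a.toNat xs (by omega)]
    simp
  · rw [min_eq_left (by omega), if_pos (by omega)]
    set q : Int := ((xs.length : Int) - a + n - 1) / n with hq
    have hq0 : 0 ≤ q := Int.ediv_nonneg (by omega) (by omega)
    have hmod0 : 0 ≤ ((xs.length : Int) - a + n - 1) % n := Int.emod_nonneg _ (by omega)
    have hmod1 : ((xs.length : Int) - a + n - 1) % n < n := Int.emod_lt_of_pos _ hn
    have hde : n * q + ((xs.length : Int) - a + n - 1) % n = (xs.length : Int) - a + n - 1 :=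
      Int.mul_ediv_add_emod _ n
    have hcov : (xs.length : Int) ≤ a + n * q := by omega
    have hcast : ∀ k : Nat, (a + n * (k : Int)).toNat = a.toNat + n.toNat * k := by
      intro k
      have : a + n * (k : Int) = ((a.toNat + n.toNat * k : Nat) : Int) := by
        push_cast [Int.toNat_of_nonneg ha, Int.toNat_of_nonneg (le_of_lt hn)]
        ring
      rw [this, Int.toNat_natCast]
    congr 1
    rw [List.filterMap_congr (g := fun k => xs[a.toNat + n.toNat * k]?)
        (by intro k _; rw [hcast k])]
    apply pv_filterMap_range_eq_pick n.toNat (by omega)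
    have : (a + n * q).toNat = a.toNat + n.toNat * q.toNat := by
      have : a + n * q = ((a.toNat + n.toNat * q.toNat : Nat) : Int) := by
        push_cast [Int.toNat_of_nonneg ha, Int.toNat_of_nonneg (le_of_lt hn),
          Int.toNat_of_nonneg hq0]
        ring
      rw [this, Int.toNat_natCast]
    omega

theorem pv_set_update_of_subset (s l : List Int) (h : ∀ x ∈ l, x ∈ s) :
    PySem.Set.update s l = s := by
  induction l generalizing s with
  | nil => rfl
  | cons x l ih =>
    show PySem.Set.update (PySem.Set.add s x) l = s
    have hx : PySem.Set.add s x = s := by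
      simp only [PySem.Set.add]
      rw [if_pos ((PySem.Set.contains_iff s x).mpr (h x (by simp)))]
    rw [hx]
    exact ih s (fun y hy => h y (by simp [hy]))

theorem allocate_couriers_eq (optimal_route all_locations location_ids : List Int)
    (num_couriers canteen_node canteen_id : Int)
    (hpre : Pre_allocate_couriers optimal_route all_locations location_ids num_couriers canteen_node canteen_id) :
    allocate_couriers optimal_route all_locations location_ids num_couriers canteen_node canteen_id
      = allocate_couriers_alt optimal_route all_locations location_ids num_couriers canteen_node canteen_id := by
  unfold allocate_couriers allocate_couriers_alt
  simp only []
  set p : Int → Bool :=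
    fun idx => PySem.List.pyGetD all_locations idx canteen_node != canteen_node with hp
  set F : List Int := optimal_route.filter p with hF
  set n : Int := num_couriers with hn
  set R : List Int := PySem.List.pyRange 1 (n + 1) 1 with hR
  -- A's filter loop is List.filter
  rw [PySem.List.foldl_append_if_eq_filter p optimal_route []]
  simp only [List.nil_append]
  by_cases hpos : 1 ≤ n
  · -- num_couriers ≥ 1
    -- d0
    have hRnd : R.Nodup := PySem.List.nodup_pyRange_one 1 (n + 1)
    have hd0items :
        ((R.foldl (fun d cid => d.insert cid ([] : List Int)) PySem.Dict.empty)).items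
          = R.map (fun c => (c, ([] : List Int))) := by
      have := PySem.Dict.items_foldl_insert_fresh R (fun a => a) (fun _ => ([] : List Int))
        PySem.Dict.empty (fun a _ => PySem.Dict.contains_empty a) (by simpa using hRnd)
      simpa using this
    set d0 : PySem.Dict Int (List Int) :=
      R.foldl (fun d cid => d.insert cid ([] : List Int)) PySem.Dict.empty with hd0
    have hd0keys : d0.keys = R := by
      simp [PySem.Dict.keys, hd0items, List.map_map, Function.comp_def]
    -- rewrite the modify fold over a mapped list
    have hfold :
        (PySem.List.enumerate F 0).foldl
            (fun d q => d.modify (PySem.Int.mod q.1 n + 1) [] (fun l => l ++ [q.2])) d0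
          = ((PySem.List.enumerate F 0).map
              (fun q => (PySem.Int.mod q.1 n + 1, q.2))).foldl
              (fun d q => d.modify q.1 [] (fun l => l ++ [q.2])) d0 := by
      rw [List.foldl_map]
    set E : List (Int × Int) :=
      (PySem.List.enumerate F 0).map (fun q => (PySem.Int.mod q.1 n + 1, q.2)) with hE
    set d1 : PySem.Dict Int (List Int) :=
      E.foldl (fun d q => d.modify q.1 [] (fun l => l ++ [q.2])) d0 with hd1
    rw [hfold]
    -- keys of d1
    have hmemE : ∀ q ∈ E, q.1 ∈ R := by
      intro q hq
      rw [hE] at hq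
      obtain ⟨q0, _, rfl⟩ := List.mem_map.mp hq
      rw [hR, PySem.List.mem_pyRange_one]
      have h1 := PySem.Int.mod_nonneg q0.1 hpos
      have h2 := PySem.Int.mod_lt q0.1 hpos
      omega
    have hd1keys : d1.keys = R := by
      rw [hd1, PySem.Dict.keys_foldl_modify_key E Prod.fst []
        (fun _ q => (fun l => l ++ [q.2])) d0, hd0keys]
      exact pv_set_update_of_subset R (E.map Prod.fst)
        (fun x hx => by obtain ⟨q, hq, rfl⟩ := List.mem_map.mp hx; exact hmemE q hq)
    have hd1nd : d1.keys.Nodup := by rw [hd1keys]; exact hRnd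
    -- items via keys
    rw [PySem.Dict.items_eq_map_keys d1 hd1nd []]
    rw [hd1keys]
    -- B's items
    have hBitems :
        ((R.foldl (fun d cid =>
            d.insert cid ((PySem.List.slice? F (some (cid - 1)) none n).getD []))
          PySem.Dict.empty)).items
          = R.map (fun cid => (cid, (PySem.List.slice? F (some (cid - 1)) none n).getD [])) := by
      have := PySem.Dict.items_foldl_insert_fresh R (fun a => a)
        (fun cid => (PySem.List.slice? F (some (cid - 1)) none n).getD [])
        PySem.Dict.empty (fun a _ => PySem.Dict.contains_empty a) (by simpa using hRnd)
      simpa using this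
    rw [hBitems]
    -- pointwise
    apply List.map_congr_left
    intro r hr
    have hr' := (PySem.List.mem_pyRange_one).mp (hR ▸ hr)
    have hr1 : 1 ≤ r := hr'.1
    have hrn : r ≤ n := by omega
    congr 1
    -- A's value at key r
    have hA : d1.getD r [] =
        pvPick n.toNat (((r - 1 - 0 : Int)) % n).toNat F := by
      rw [hd1, PySem.Dict.getD_foldl_modify_append E d0 r]
      have hd0r : d0.getD r [] = [] := by
        apply PySem.Dict.getD_of_mem_items d0 (k := r) (v := [])
        · rw [hd0items]
          exact List.mem_map.mpr ⟨r, hr, rfl⟩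
        · rw [hd0keys]; exact hRnd
      rw [hd0r, List.nil_append, hE, List.filter_map, List.map_map]
      have := pv_enum_filter_eq_pick n r hpos hr1 hrn F 0 (le_refl 0)
      rw [← this]
      rfl
    rw [hA]
    rw [pv_slice_eq_pick F (r - 1) n (by omega) hpos]
    simp only [Option.getD_some]
    congr 2
    rw [Int.emod_eq_of_lt (by omega) (by omega)]
    ring
  · -- num_couriers ≤ 0: Pre_'s second disjunct gives an all-canteen route, so F = [] and R = []
    have hall : ∀ i ∈ optimal_route, PySem.List.pyGet? all_locations i = some canteen_node := by
      rcases hpre.2 with h | h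
      · omega
      · exact h
    have hFnil : F = [] := by
      rw [hF]
      apply List.filter_eq_nil_iff.mpr
      intro a ha
      have := hall a ha
      simp [hp, PySem.List.pyGetD, this]
    have hRnil : R = [] := by
      rw [hR]
      exact PySem.List.pyRange_one_eq_nil (by omega)
    rw [← hF, hFnil, hRnil]
    simp [PySem.List.enumerate_nil]

-- ===== VERDICT (by name: the statement is the Claim_ definition above) =====
theorem allocate_couriers_spec : Claim_equal_allocate_couriers := by
  intro optimal_route all_locations location_ids num_couriers canteen_node canteen_id _ hpre
  exact allocate_couriers_eq optimal_route all_locations location_ids num_couriers canteen_node canteen_id hpre
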